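-- pv_equiv track=rewrite | github.com/MatthewCarey24/me35 | midterm/main.py | read_variable_length
-- ===== SOURCE A (Python) =====
-- def read_variable_length(data, offset):
--     """Read a variable-length value from MIDI data."""
--     value = 0
--     while True:
--         byte = data[offset]
--         value = (value << 7) | (byte & 0x7F)
--         offset += 1
--         if not (byte & 0x80):
--             break
--     return value, offset
-- ===== SOURCE B (Python) =====
-- def read_variable_length(data, offset):
--     """Read a variable-length value from MIDI data.
--
--     Two passes: first locate the end of the varint span, then fold the
--     span's bytes into the value."""
--     end = offset
--     while data[end] & 0x80:
--         end += 1
--     end += 1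
--     value = 0
--     for i in range(offset, end):
--         value = (value << 7) | (data[i] & 0x7F)
--     return value, end
-- ===== Notes on version B (the rewrite author's own statement) =====
-- stated objective: alternative
-- what changed: A computes the value and the end offset in a single accumulating while-loop; B first scans forward to locate the end of the variable-length span, then folds the bytes of the located range [offset, end) into the value in a separate pass.
import Mathlib
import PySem

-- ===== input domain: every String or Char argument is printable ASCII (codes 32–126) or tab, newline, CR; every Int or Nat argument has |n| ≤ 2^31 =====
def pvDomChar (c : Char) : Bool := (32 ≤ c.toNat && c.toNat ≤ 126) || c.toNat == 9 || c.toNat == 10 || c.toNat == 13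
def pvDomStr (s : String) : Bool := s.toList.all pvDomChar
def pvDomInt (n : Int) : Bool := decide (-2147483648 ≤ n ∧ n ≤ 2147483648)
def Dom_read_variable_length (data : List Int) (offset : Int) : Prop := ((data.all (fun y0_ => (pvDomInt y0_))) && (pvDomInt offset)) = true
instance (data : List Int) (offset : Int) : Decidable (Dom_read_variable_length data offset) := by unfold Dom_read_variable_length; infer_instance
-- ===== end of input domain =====

-- B separates locating the end of the variable-length span (one scan) from folding its
-- bytes into the value (a second pass); A does both in one accumulating loop. Objective: alternative.


-- ===== PORT A =====
-- A's 'while True' loop; the fuel 2*len+1 is a totality guard only: under Pre_ the loop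
-- performs at most 2*len accesses (each a distinct valid index), and when an index is
-- invalid (Python IndexError, excluded by Pre_) the port returns the junk value (0, 0).
def rvlLoopA (data : List Int) : Nat → Int → Int → Int × Int
  | 0, _, _ => (0, 0)
  | f+1, value, offset =>
    match PySem.List.pyGet? data offset with
    | none => (0, 0)
    | some byte =>
      let value' := PySem.Int.bor (value <<< 7) (PySem.Int.band byte 127)
      if PySem.Int.band byte 128 == 0 then (value', offset + 1)
      else rvlLoopA data f value' (offset + 1)

def read_variable_length (data : List Int) (offset : Int) : Int × Int :=
  rvlLoopA data (2 * data.length + 1) 0 offset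

-- ===== PORT B =====
-- first pass of Source B: advance while the continuation bit is set, then one more step;
-- none = Python IndexError (excluded by Pre_); same totality fuel as port A.
def rvlScanEnd (data : List Int) : Nat → Int → Option Int
  | 0, _ => none
  | f+1, i =>
    match PySem.List.pyGet? data i with
    | none => none
    | some b => if PySem.Int.band b 128 == 0 then some (i + 1) else rvlScanEnd data f (i + 1)

def read_variable_length_alt (data : List Int) (offset : Int) : Int × Int :=
  match rvlScanEnd data (2 * data.length + 1) offset with
  | none => (0, 0)   -- unreachable under Pre_ (Python raised IndexError)
  | some e =>
    ((PySem.List.pyRange offset e 1).foldl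
        (fun v i => PySem.Int.bor (v <<< 7) (PySem.Int.band ((PySem.List.pyGet? data i).getD 0) 127)) 0,
     e)

-- ===== PRECONDITION & SPEC =====
-- Pre_ = exactly the inputs on which Python A returns (no IndexError): some byte at step j
-- (j bounded by 2*len, since the visited valid indices are distinct) has its high bit clear,
-- and every byte before it is a valid access with the high bit set.
def Pre_read_variable_length (data : List Int) (offset : Int) : Prop :=
  ∃ j ∈ List.range (2 * data.length + 1),
    ((List.range j).all fun k =>
        (PySem.List.pyGet? data (offset + k)).any fun v => PySem.Int.band v 128 != 0) = true ∧
    ((PySem.List.pyGet? data (offset + j)).any fun v => PySem.Int.band v 128 == 0) = true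
instance (data : List Int) (offset : Int) : Decidable (Pre_read_variable_length data offset) := by
  unfold Pre_read_variable_length; infer_instance

def pvWitness_read_variable_length : List Int × Int := ([129, 5], 0)

def Spec_read_variable_length (data : List Int) (offset : Int) (out : Int × Int) : Prop := out = read_variable_length_alt data offset
instance (data : List Int) (offset : Int) (out : Int × Int) : Decidable (Spec_read_variable_length data offset out) := by unfold Spec_read_variable_length; infer_instance

-- ===== CLAIM (what is proved, stated in full; the proofs are below) =====
def Claim_equal_read_variable_length : Prop := ∀ (data : List Int) (offset : Int), Dom_read_variable_length data offset → Pre_read_variable_length data offset → Spec_read_variable_length data offset (read_variable_length data offset)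

-- ===== LEMMAS AND PROOFS =====

-- B's scan only moves forward.
theorem rvlScanEnd_lt (data : List Int) :
    ∀ (f : Nat) (i e : Int), rvlScanEnd data f i = some e → i < e := by
  intro f
  induction f with
  | zero => intro i e h; simp [rvlScanEnd] at h
  | succ f ih =>
    intro i e h
    simp only [rvlScanEnd] at h
    cases hg : PySem.List.pyGet? data i with
    | none => rw [hg] at h; simp at h
    | some b =>
      rw [hg] at h
      by_cases hb : PySem.Int.band b 128 == 0
      · simp [hb] at h; omega
      · simp [hb] at h
        have := ih _ _ h
        omega

-- A's one-pass loop equals B's scan-then-fold, for every fuel, start value and index.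
theorem rvlLoopA_eq_scan_fold (data : List Int) :
    ∀ (f : Nat) (i v : Int),
      rvlLoopA data f v i =
        match rvlScanEnd data f i with
        | none => (0, 0)
        | some e =>
          ((PySem.List.pyRange i e 1).foldl
              (fun acc j => PySem.Int.bor (acc <<< 7)
                  (PySem.Int.band ((PySem.List.pyGet? data j).getD 0) 127)) v,
           e) := by
  intro f
  induction f with
  | zero => intro i v; simp [rvlLoopA, rvlScanEnd]
  | succ f ih =>
    intro i v
    simp only [rvlLoopA, rvlScanEnd]
    cases hg : PySem.List.pyGet? data i with
    | none => simp
    | some b =>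
      by_cases hb : PySem.Int.band b 128 == 0
      · -- terminating byte: the range is the singleton [i]
        simp only [hb, if_true]
        rw [PySem.List.pyRange_one_cons (by omega), PySem.List.pyRange_one_eq_nil (by omega)]
        simp [hg]
      · -- continuation byte: peel i off the range and use the IH
        simp only [hb]
        rw [ih (i + 1) (PySem.Int.bor (v <<< 7) (PySem.Int.band b 127))]
        cases hs : rvlScanEnd data f (i + 1) with
        | none => simp
        | some e =>
          have hi : i < e := by have := rvlScanEnd_lt data f (i+1) e hs; omega
          simp only [Bool.false_eq_true, if_false]
          rw [PySem.List.pyRange_one_cons hi]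
          simp [hg]

-- ===== VERDICT (by name: the statement is the Claim_ definition above) =====
theorem read_variable_length_spec : Claim_equal_read_variable_length := by
  intro data offset _ _
  unfold Spec_read_variable_length read_variable_length read_variable_length_alt
  rw [rvlLoopA_eq_scan_fold]
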